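-- pv_equiv track=rewrite | github.com/expyriment/expyriment | expyriment/design/permute.py | cycled_latin_square
-- ===== SOURCE A (Python) =====
-- from builtins import range
--
-- def _empty_square(n):
--     square = []
--     for x in range(0, n):
--         square.append([])
--         for _i in range(0, n):
--             square[x].append(None)
--     return square
--
-- def _square_of_elements(list_, idx_square):
--     """Return a square array of elements.
--
--     Returns
--     -------
--     square : list
--         a square array with the elements from the list defined by
--         idx_square e.g.; idx_square[a][b] is the list index of element[a][b].
--
--     """
--
--     square = _empty_square(len(list_))
--     for c in range(0, len(list_)):
--         for r in range(0, len(list_)):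
--             square[r][c] = list_[idx_square[r][c]]
--     return square
--
-- def _cycle_list(arr):
--     rtn = arr[1:]
--     rtn.append(arr[0])
--     return rtn
--
-- def cycled_latin_square(elements):
--     """A cycled latin square permutation of elements.
--
--     If elements is a integer the elements=[0,..., elements] is used.
--
--     Parameters
--     ----------
--     elements : int or list
--         list of elements or a number
--
--     """
--
--     if type(elements) is list:
--         idx = cycled_latin_square(len(elements))
--         square = _square_of_elements(elements, idx)
--     else:
--         square = [list(range(0, elements))]
--         for r in range(0, elements - 1):
--             square.append(_cycle_list(square[r]))
--     return square
-- ===== SOURCE B (Python) =====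
-- def cycled_latin_square(elements):
--     """A cycled latin square permutation of elements (closed form)."""
--     if type(elements) is list:
--         n = len(elements)
--         return [[elements[(r + c) % n] for c in range(n)] for r in range(n)]
--     else:
--         square = [list(range(elements))]
--         for r in range(1, elements):
--             square.append([(r + c) % elements for c in range(elements)])
--         return square
-- ===== Notes on version B (the rewrite author's own statement) =====
-- stated objective: simpler
-- what changed: Replaces the recursive index-square construction (build an index latin square by repeatedly cycling the previous row, then map it over the elements through a None-filled mutable square) by the direct closed form elements[(r+c) % n] computed independently per cell, removing the recursion, the sequential row dependency and the two-phase fill.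
import Mathlib
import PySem

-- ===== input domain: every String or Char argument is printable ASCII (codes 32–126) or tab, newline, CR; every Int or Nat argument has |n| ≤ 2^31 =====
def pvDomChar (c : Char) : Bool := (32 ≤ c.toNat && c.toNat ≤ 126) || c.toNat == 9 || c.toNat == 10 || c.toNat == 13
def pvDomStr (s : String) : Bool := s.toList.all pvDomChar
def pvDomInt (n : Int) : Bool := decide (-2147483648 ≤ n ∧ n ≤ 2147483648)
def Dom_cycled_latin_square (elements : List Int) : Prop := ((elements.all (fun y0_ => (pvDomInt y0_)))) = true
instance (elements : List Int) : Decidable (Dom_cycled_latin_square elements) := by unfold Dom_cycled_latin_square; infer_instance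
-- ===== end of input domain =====

-- B replaces A's recursion + cycle-the-previous-row + None-square two-phase fill by the
-- per-cell closed form elements[(r+c) % n]; equivalence of the return values is proved below.

-- ===== PORT A =====
-- range(0, len(...)) over nonnegative bounds is ported as List.range; the None placeholder of
-- _empty_square is ported as 0 (every cell is overwritten before the square is returned).
def pvEmptySquareA (n : Nat) : List (List Int) :=
  (List.range n).foldl (fun square _x =>
    square ++ [((List.range n).foldl (fun row _i => row ++ [(0 : Int)]) [])]) []

-- square[r][c] = list_[idx[r][c]]; the in-place assignment is ported as List.set, the reads
-- square[r] / idx[r][c] as getD (always in range here), list_[...] exactly as pyGet?.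
def pvSquareOfElementsA (list_ : List Int) (idx : List (List Int)) : List (List Int) :=
  (List.range list_.length).foldl (fun square c =>
    (List.range list_.length).foldl (fun square r =>
      square.set r ((square.getD r []).set c
        ((PySem.List.pyGet? list_ ((idx.getD r []).getD c 0)).getD 0))) square)
    (pvEmptySquareA list_.length)

-- arr[1:] = drop 1; arr[0] is always in range at the call sites (rows are nonempty there).
def pvCycleListA (arr : List Int) : List Int :=
  arr.drop 1 ++ [(PySem.List.pyGet? arr 0).getD 0]

-- Python's integer branch, reached only via cycled_latin_square(len(elements)) (a Nat).
def pvClsIntA (n : Nat) : List (List Int) :=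
  (List.range (n - 1)).foldl (fun square r =>
    square ++ [pvCycleListA (square.getD r [])])
    [(List.range n).map (fun (i : Nat) => (i : Int))]

def cycled_latin_square (elements : List Int) : List (List Int) :=
  pvSquareOfElementsA elements (pvClsIntA elements.length)

-- ===== PORT B =====
def cycled_latin_square_alt (elements : List Int) : List (List Int) :=
  (List.range elements.length).map (fun r =>
    (List.range elements.length).map (fun c =>
      elements.getD ((r + c) % elements.length) 0))

-- ===== PRECONDITION & SPEC =====
def Spec_cycled_latin_square (elements : List Int) (out : List (List Int)) : Prop := out = cycled_latin_square_alt elements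
instance (elements : List Int) (out : List (List Int)) : Decidable (Spec_cycled_latin_square elements out) := by unfold Spec_cycled_latin_square; infer_instance

-- ===== CLAIM (what is proved, stated in full; the proofs are below) =====
def Claim_equal_cycled_latin_square : Prop := ∀ (elements : List Int), Dom_cycled_latin_square elements → Spec_cycled_latin_square elements (cycled_latin_square elements)

-- ===== LEMMAS AND PROOFS =====

-- the row of the integer-index latin square: row r is [(r+c) % n for c in range(n)]
def pvRowFn (n r : Nat) : List Int := (List.range n).map (fun c => (((r + c) % n : Nat) : Int))

theorem pvEmptySquareA_eq (n : Nat) :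
    pvEmptySquareA n = (List.range n).map (fun _ => List.replicate n (0 : Int)) := by
  unfold pvEmptySquareA
  rw [PySem.List.foldl_append_singleton_eq_map, PySem.List.foldl_append_singleton_eq_map]
  simp [List.map_const']

theorem pvSetMapRange {α : Type} {n k : Nat} (F : Nat → α) (v : α) (hk : k < n) :
    ((List.range n).map F).set k v
      = (List.range n).map (fun r => if r = k then v else F r) := by
  apply List.ext_getElem
  · simp
  · intro i h1 h2
    simp only [List.length_set, List.length_map, List.length_range] at h1
    simp [List.getElem_set, List.getElem_map, List.getElem_range, eq_comm]

theorem pvInnerLoop (n : Nat) (step : Nat → List Int → List Int) (F : Nat → List Int) :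
    ∀ k, k ≤ n →
      (List.range k).foldl (fun sq r => sq.set r (step r (sq.getD r []))) ((List.range n).map F)
        = (List.range n).map (fun r => if r < k then step r (F r) else F r) := by
  intro k
  induction k with
  | zero =>
    intro _
    simp
  | succ k ih =>
    intro hk
    have hkn : k < n := by omega
    rw [List.range_succ (n := k), List.foldl_append, ih (by omega)]
    simp only [List.foldl_cons, List.foldl_nil]
    rw [PySem.List.getD_map_range _ _ _ _ hkn]
    rw [if_neg (lt_irrefl k)]
    rw [pvSetMapRange _ _ (by omega : k < n)]
    apply List.map_congr_left
    intro r hr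
    simp only [List.mem_range] at hr
    by_cases h1 : r = k
    · subst h1
      rw [if_pos rfl, if_pos (by omega)]
    · rw [if_neg h1]
      by_cases h2 : r < k
      · rw [if_pos h2, if_pos (by omega)]
      · rw [if_neg h2, if_neg (by omega)]

theorem pvInnerLoopFull (n : Nat) (step : Nat → List Int → List Int) (F : Nat → List Int) :
    (List.range n).foldl (fun sq r => sq.set r (step r (sq.getD r []))) ((List.range n).map F)
      = (List.range n).map (fun r => step r (F r)) := by
  rw [pvInnerLoop n step F n (le_refl n)]
  apply List.map_congr_left
  intro r hr
  simp only [List.mem_range] at hr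
  simp [hr]

theorem pvCycleRow (m r : Nat) :
    pvCycleListA (pvRowFn (m + 1) r) = pvRowFn (m + 1) (r + 1) := by
  have hL : pvRowFn (m + 1) r
      = (((r + 0) % (m + 1) : Nat) : Int)
        :: (List.range m).map (fun c => (((r + (c + 1)) % (m + 1) : Nat) : Int)) := by
    unfold pvRowFn
    rw [List.range_succ_eq_map]
    simp [List.map_map, Function.comp_def]
  have hR : pvRowFn (m + 1) (r + 1)
      = (List.range m).map (fun c => (((r + 1 + c) % (m + 1) : Nat) : Int))
        ++ [(((r + 1 + m) % (m + 1) : Nat) : Int)] := by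
    unfold pvRowFn
    rw [List.range_succ (n := m)]
    simp
  unfold pvCycleListA
  rw [hL, hR]
  simp only [List.drop_succ_cons, List.drop_zero, PySem.List.pyGet?_zero_cons, Option.getD_some]
  congr 1
  · apply List.map_congr_left
    intro c hc
    have h : r + (c + 1) = r + 1 + c := by omega
    rw [h]
  · congr 2
    conv_rhs => rw [show r + 1 + m = r + 0 + (m + 1) by omega]
    rw [Nat.add_mod_right]

theorem pvClsIntA_eq (m : Nat) :
    pvClsIntA (m + 1) = (List.range (m + 1)).map (pvRowFn (m + 1)) := by
  have init : (List.range (m + 1)).map (fun (i : Nat) => (i : Int)) = pvRowFn (m + 1) 0 := by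
    unfold pvRowFn
    apply List.map_congr_left
    intro c hc
    simp only [List.mem_range] at hc
    rw [Nat.zero_add, Nat.mod_eq_of_lt (by omega)]
  have main : ∀ k, k ≤ m →
      (List.range k).foldl (fun square r => square ++ [pvCycleListA (square.getD r [])])
        [(List.range (m + 1)).map (fun (i : Nat) => (i : Int))]
      = (List.range (k + 1)).map (pvRowFn (m + 1)) := by
    intro k
    induction k with
    | zero =>
      intro _
      rw [List.range_one]
      simp only [List.map_cons, List.map_nil]
      rw [List.range_zero, List.foldl_nil, init]
    | succ k ih =>
      intro hk
      rw [List.range_succ (n := k), List.foldl_append, ih (by omega)]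
      simp only [List.foldl_cons, List.foldl_nil]
      rw [PySem.List.getD_map_range _ _ _ _ (by omega : k < k + 1)]
      rw [pvCycleRow]
      rw [List.range_succ (n := k + 1), List.map_append]
      simp
  unfold pvClsIntA
  simpa using main m (le_refl m)

theorem pvOuterLoop (elements : List Int) (m : Nat) (_hlen : elements.length = m + 1) :
    ∀ k, k ≤ m + 1 →
      (List.range k).foldl (fun square c =>
        (List.range (m + 1)).foldl (fun square r =>
          square.set r ((square.getD r []).set c
            ((PySem.List.pyGet? elements
              (((((List.range (m + 1)).map (pvRowFn (m + 1))).getD r []).getD c 0))).getD 0))) square)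
        ((List.range (m + 1)).map (fun _ => List.replicate (m + 1) (0 : Int)))
      = (List.range (m + 1)).map (fun r => (List.range (m + 1)).map (fun c =>
          if c < k then elements.getD ((r + c) % (m + 1)) 0 else 0)) := by
  have hval : ∀ r c, r < m + 1 → c < m + 1 →
      ((PySem.List.pyGet? elements
        (((((List.range (m + 1)).map (pvRowFn (m + 1))).getD r []).getD c 0))).getD 0)
        = elements.getD ((r + c) % (m + 1)) 0 := by
    intro r c hr hc
    rw [PySem.List.getD_map_range _ _ _ _ hr]
    unfold pvRowFn
    rw [PySem.List.getD_map_range _ _ _ _ hc]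
    rw [PySem.List.pyGet?_natCast]
    simp [List.getD]
  intro k
  induction k with
  | zero =>
    intro _
    apply List.map_congr_left
    intro r hr
    apply List.ext_getElem <;> simp
  | succ k ih =>
    intro hk
    rw [List.range_succ (n := k), List.foldl_append, ih (by omega)]
    simp only [List.foldl_cons, List.foldl_nil]
    rw [pvInnerLoopFull (m + 1)
      (fun r row => row.set k
        ((PySem.List.pyGet? elements
          (((((List.range (m + 1)).map (pvRowFn (m + 1))).getD r []).getD k 0))).getD 0))]
    apply List.map_congr_left
    intro r hr
    simp only [List.mem_range] at hr
    rw [hval r k hr (by omega)]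
    rw [pvSetMapRange _ _ (by omega : k < m + 1)]
    apply List.map_congr_left
    intro c hc
    simp only [List.mem_range] at hc
    by_cases h1 : c = k <;> by_cases h2 : c < k <;> simp_all <;> omega

-- ===== VERDICT (by name: the statement is the Claim_ definition above) =====
theorem cycled_latin_square_spec : Claim_equal_cycled_latin_square := by
  intro elements _
  unfold Spec_cycled_latin_square
  cases elements with
  | nil => rfl
  | cons e es =>
    set m := es.length with hm
    have hlen : (e :: es).length = m + 1 := by simp [hm]
    unfold cycled_latin_square cycled_latin_square_alt
    rw [hlen, pvClsIntA_eq m]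
    unfold pvSquareOfElementsA
    rw [hlen, pvEmptySquareA_eq]
    have := pvOuterLoop (e :: es) m hlen (m + 1) (le_refl (m + 1))
    rw [this]
    apply List.map_congr_left
    intro r hr
    apply List.map_congr_left
    intro c hc
    simp only [List.mem_range] at hc
    simp [hc]
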